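-- pv_equiv track=rewrite | github.com/dhanushkonduru/askmypdf | pipelines/query_pdf.py | build_sources_list
-- ===== SOURCE A (Python) =====
-- from typing import List, Dict, Optional, Tuple, Any
--
-- def build_sources_list(chunks: List[Dict]) -> List[str]:
--     """Build deduplicated sources list."""
--     sources_seen = set()
--     sources_list = []
--
--     for chunk in chunks:
--         source_key = (chunk['source'], chunk.get('source_url', ''))
--         if source_key not in sources_seen:
--             sources_seen.add(source_key)
--             if chunk.get('source_url'):
--                 sources_list.append(f"- {chunk['source']} ({chunk['source_url']})")
--             else:
--                 sources_list.append(f"- {chunk['source']}")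
--
--     return sources_list
-- ===== SOURCE B (Python) =====
-- def build_sources_list(chunks):
--     """Build deduplicated sources list by repeatedly filtering out the head key."""
--     keys = [(c['source'], c.get('source_url', '')) for c in chunks]
--     unique = []
--     while keys:
--         head = keys[0]
--         unique.append(head)
--         keys = [k for k in keys[1:] if k != head]
--     return [f"- {s} ({u})" if u else f"- {s}" for s, u in unique]
-- ===== Notes on version B (the rewrite author's own statement) =====
-- stated objective: alternative
-- what changed: B deduplicates without any seen-set: it repeatedly takes the head key and filters every later duplicate of it out of the remaining list (nub-by-filtering), then formats the unique keys in a separate pass; A maintains a seen set and formats inside one gated loop.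
import Mathlib
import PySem

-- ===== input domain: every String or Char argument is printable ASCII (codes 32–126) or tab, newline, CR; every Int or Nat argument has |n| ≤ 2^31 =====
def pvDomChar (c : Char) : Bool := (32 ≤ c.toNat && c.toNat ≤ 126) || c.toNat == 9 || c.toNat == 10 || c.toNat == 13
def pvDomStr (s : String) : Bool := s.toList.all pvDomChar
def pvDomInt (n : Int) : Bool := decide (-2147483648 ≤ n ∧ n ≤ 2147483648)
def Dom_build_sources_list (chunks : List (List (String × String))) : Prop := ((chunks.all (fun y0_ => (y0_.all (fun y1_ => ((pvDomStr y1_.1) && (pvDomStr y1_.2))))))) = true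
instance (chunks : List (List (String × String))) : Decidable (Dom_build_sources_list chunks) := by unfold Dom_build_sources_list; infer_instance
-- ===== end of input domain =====

-- B deduplicates by repeatedly filtering the head key out of the remaining keys (no seen set),
-- then formats in a separate pass; alternative decomposition, same result.

-- ===== PORT A =====
-- single loop: seen-set + output list built together
def build_sources_list (chunks : List (List (String × String))) : List String :=
  (chunks.foldl (fun (st : PySem.Set (String × String) × List String) chunk =>
      let sourceKey : String × String :=
        ((PySem.Dict.mk chunk).getD "source" "", (PySem.Dict.mk chunk).getD "source_url" "")
      if PySem.Set.contains st.1 sourceKey then st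
      else
        let seen := PySem.Set.add st.1 sourceKey
        if (PySem.Dict.mk chunk).getD "source_url" "" ≠ "" then
          (seen, st.2 ++ ["- " ++ (PySem.Dict.mk chunk).getD "source" "" ++ " ("
                            ++ (PySem.Dict.mk chunk).getD "source_url" "" ++ ")"])
        else
          (seen, st.2 ++ ["- " ++ (PySem.Dict.mk chunk).getD "source" ""]))
    (PySem.Set.empty, [])).2

-- ===== PORT B =====
-- Source B's while loop: take the head key, drop every later duplicate of it, repeat
def pvNub (ks : List (String × String)) : List (String × String) :=
  match ks with
  | [] => []
  | k :: rest => k :: pvNub (rest.filter (fun x => x != k))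
termination_by ks.length
decreasing_by
  simp only [List.length_cons, Nat.lt_succ_iff, List.length_unattach]
  exact (List.length_filter_le _ _).trans (le_of_eq List.length_attach)

-- format one unique (source, url) key (Source B's final list comprehension body)
def fmtSource (k : String × String) : String :=
  if k.2 ≠ "" then "- " ++ k.1 ++ " (" ++ k.2 ++ ")" else "- " ++ k.1

def build_sources_list_alt (chunks : List (List (String × String))) : List String :=
  (pvNub (chunks.map (fun chunk =>
      ((PySem.Dict.mk chunk).getD "source" "", (PySem.Dict.mk chunk).getD "source_url" "")))).map
    fmtSource

-- ===== PRECONDITION & SPEC =====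
-- A (and B) raise KeyError on a chunk without a 'source' key; exactly those inputs are excluded.
def Pre_build_sources_list (chunks : List (List (String × String))) : Prop :=
  ∀ chunk ∈ chunks, (PySem.Dict.mk chunk).contains "source" = true
instance (chunks : List (List (String × String))) : Decidable (Pre_build_sources_list chunks) := by
  unfold Pre_build_sources_list; infer_instance

def pvWitness_build_sources_list : (List (List (String × String))) :=
  [[("source", "doc.pdf"), ("source_url", "http://x")], [("source", "doc.pdf")]]

def Spec_build_sources_list (chunks : List (List (String × String))) (out : List String) : Prop := out = build_sources_list_alt chunks
instance (chunks : List (List (String × String))) (out : List String) : Decidable (Spec_build_sources_list chunks out) := by unfold Spec_build_sources_list; infer_instance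

-- ===== CLAIM (what is proved, stated in full; the proofs are below) =====
def Claim_equal_build_sources_list : Prop := ∀ (chunks : List (List (String × String))), Dom_build_sources_list chunks → Pre_build_sources_list chunks → Spec_build_sources_list chunks (build_sources_list chunks)

-- ===== LEMMAS AND PROOFS =====

-- key extraction shared by the proof (each port writes it inline)
def pvKeyOf (chunk : List (String × String)) : String × String :=
  ((PySem.Dict.mk chunk).getD "source" "", (PySem.Dict.mk chunk).getD "source_url" "")

-- A's loop step, expressed on the key alone
def pvStep (st : PySem.Set (String × String) × List String) (k : String × String) :
    PySem.Set (String × String) × List String :=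
  if PySem.Set.contains st.1 k then st
  else (PySem.Set.add st.1 k, st.2 ++ [fmtSource k])

lemma set_add_of_contains {t : PySem.Set (String × String)} {k : String × String}
    (h : PySem.Set.contains t k = true) : PySem.Set.add t k = t := by
  unfold PySem.Set.add; rw [h]; rfl

lemma set_add_of_not_contains {t : PySem.Set (String × String)} {k : String × String}
    (h : ¬ PySem.Set.contains t k = true) : PySem.Set.add t k = t ++ [k] := by
  unfold PySem.Set.add; rw [Bool.not_eq_true] at h; rw [h]; rfl

lemma foldl_add_exists_suffix (ks : List (String × String)) (t : PySem.Set (String × String)) :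
    ∃ r, ks.foldl PySem.Set.add t = t ++ r := by
  induction ks generalizing t with
  | nil => exact ⟨[], by simp⟩
  | cons k ks ih =>
    rw [List.foldl_cons]
    obtain ⟨r, hr⟩ := ih (PySem.Set.add t k)
    by_cases h : PySem.Set.contains t k = true
    · rw [set_add_of_contains h] at hr ⊢; exact ⟨r, hr⟩
    · rw [set_add_of_not_contains h] at hr ⊢
      exact ⟨k :: r, by simpa using hr⟩

lemma pvStep_loop (ks : List (String × String)) (s : PySem.Set (String × String))
    (out : List String) :
    (ks.foldl pvStep (s, out)).2
      = out ++ (((ks.foldl PySem.Set.add s).drop s.length).map fmtSource) := by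
  induction ks generalizing s out with
  | nil => simp
  | cons k ks ih =>
    simp only [List.foldl_cons]
    by_cases h : PySem.Set.contains s k = true
    · show (ks.foldl pvStep (if PySem.Set.contains s k then (s, out)
          else (PySem.Set.add s k, out ++ [fmtSource k]))).2 = _
      rw [if_pos h, ih s out, set_add_of_contains h]
    · show (ks.foldl pvStep (if PySem.Set.contains s k then (s, out)
          else (PySem.Set.add s k, out ++ [fmtSource k]))).2 = _
      rw [if_neg h, ih (PySem.Set.add s k) (out ++ [fmtSource k]), set_add_of_not_contains h]
      obtain ⟨r, hr⟩ := foldl_add_exists_suffix ks (s ++ [k])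
      rw [hr, List.append_assoc s [k] r, List.drop_left,
          show s ++ ([k] ++ r) = (s ++ [k]) ++ r by simp,
          List.drop_left' (by simp)]
      simp

-- A's fold body equals pvStep applied to the extracted key
lemma bodyA_eq :
    (fun (st : PySem.Set (String × String) × List String) chunk =>
      let sourceKey : String × String :=
        ((PySem.Dict.mk chunk).getD "source" "", (PySem.Dict.mk chunk).getD "source_url" "")
      if PySem.Set.contains st.1 sourceKey then st
      else
        let seen := PySem.Set.add st.1 sourceKey
        if (PySem.Dict.mk chunk).getD "source_url" "" ≠ "" then
          (seen, st.2 ++ ["- " ++ (PySem.Dict.mk chunk).getD "source" "" ++ " ("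
                            ++ (PySem.Dict.mk chunk).getD "source_url" "" ++ ")"])
        else
          (seen, st.2 ++ ["- " ++ (PySem.Dict.mk chunk).getD "source" ""]))
    = (fun st chunk => pvStep st (pvKeyOf chunk)) := by
  funext st chunk
  simp only [pvStep, pvKeyOf, fmtSource]
  split_ifs <;> rfl

-- A's seen-set dedup equals B's filter-based nub, generalised over the accumulator
lemma foldl_add_eq_nub (ks : List (String × String)) (s : PySem.Set (String × String)) :
    ks.foldl PySem.Set.add s
      = s ++ pvNub (ks.filter (fun k => !PySem.Set.contains s k)) := by
  induction ks generalizing s with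
  | nil => rw [List.filter_nil, pvNub]; simp
  | cons k ks ih =>
    rw [List.foldl_cons, List.filter_cons]
    by_cases h : PySem.Set.contains s k = true
    · have hk : (!PySem.Set.contains s k) = false := by rw [h]; rfl
      rw [set_add_of_contains h, ih s, hk, if_neg (by simp)]
    · have hk : (!PySem.Set.contains s k) = true := by
        rw [Bool.not_eq_true] at h; rw [h]; rfl
      rw [set_add_of_not_contains h, ih (s ++ [k]), hk, if_pos rfl]; rw [pvNub]; rw [
        List.append_assoc, List.singleton_append]
      congr 2
      rw [List.filter_filter]
      congr 1
      apply List.filter_congr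
      intro x _
      unfold PySem.Set.contains
      simp only [List.contains_append, Bool.not_or, bne, List.contains_cons,
        List.contains_nil, Bool.or_false]
      rw [Bool.and_comm]

-- ===== VERDICT (by name: the statement is the Claim_ definition above) =====
theorem build_sources_list_spec : Claim_equal_build_sources_list := by
  intro chunks _ _
  unfold Spec_build_sources_list build_sources_list build_sources_list_alt
  rw [bodyA_eq, ← List.foldl_map, pvStep_loop, foldl_add_eq_nub]
  have hf : List.filter (fun k => !PySem.Set.contains (PySem.Set.empty) k)
      (chunks.map pvKeyOf) = chunks.map pvKeyOf :=
    List.filter_eq_self.mpr (fun a _ => rfl)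
  rw [hf]
  rfl
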